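-- pv_equiv track=rewrite | github.com/ay0ks/BakaASM | bakaasm.py | pre_to_header
-- ===== SOURCE A (Python) =====
-- def pre_to_header(source):
--   _instr = []
--   _pre = []
--
--   for instr in source:
--     if instr.startswith("%"):
--       _pre.append(instr)
--     else:
--       _instr.append(instr)
--
--   return _pre + _instr
-- ===== SOURCE B (Python) =====
-- def pre_to_header(source):
--   return sorted(source, key=lambda line: not line.startswith("%"))
-- ===== Notes on version B (the rewrite author's own statement) =====
-- stated objective: idiomatic
-- what changed: Replaces the two-bucket partition loop with a single stable sort keyed on not line.startswith('%'), which places directives first while preserving relative order.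
import Mathlib
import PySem

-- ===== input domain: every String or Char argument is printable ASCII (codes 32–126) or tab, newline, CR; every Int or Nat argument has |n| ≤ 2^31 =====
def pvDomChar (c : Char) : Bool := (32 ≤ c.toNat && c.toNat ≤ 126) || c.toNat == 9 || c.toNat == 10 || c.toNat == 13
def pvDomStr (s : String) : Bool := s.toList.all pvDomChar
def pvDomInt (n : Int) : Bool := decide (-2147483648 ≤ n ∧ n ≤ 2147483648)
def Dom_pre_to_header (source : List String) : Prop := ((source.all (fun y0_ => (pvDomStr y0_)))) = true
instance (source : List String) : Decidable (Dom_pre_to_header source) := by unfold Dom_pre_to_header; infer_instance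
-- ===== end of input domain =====

-- B replaces A's two-bucket partition loop with one stable sort keyed on
-- `not line.startswith("%")` (idiomatic; same result, no speed claim).

-- ===== PORT A =====
-- state: (.1 = _instr, .2 = _pre), appended to exactly as in the Python loop
def pre_to_header (source : List String) : List String :=
  let st := source.foldl
    (fun (st : List String × List String) instr =>
      if PySem.Str.startswith instr "%" then (st.1, st.2 ++ [instr])
      else (st.1 ++ [instr], st.2))
    ([], [])
  st.2 ++ st.1

-- ===== PORT B =====
-- Python's bool sort key (False < True) ported as Nat 0/1: startswith "%" → 0, otherwise 1
def pre_to_header_alt (source : List String) : List String :=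
  PySem.List.sorted source (fun line => if PySem.Str.startswith line "%" then (0 : Nat) else 1)

-- ===== PRECONDITION & SPEC =====
def Spec_pre_to_header (source : List String) (out : List String) : Prop := out = pre_to_header_alt source
instance (source : List String) (out : List String) : Decidable (Spec_pre_to_header source out) := by unfold Spec_pre_to_header; infer_instance

-- ===== CLAIM (what is proved, stated in full; the proofs are below) =====
def Claim_equal_pre_to_header : Prop := ∀ (source : List String), Dom_pre_to_header source → Spec_pre_to_header source (pre_to_header source)

-- ===== LEMMAS AND PROOFS =====

def pvKey (s : String) : Nat := if PySem.Str.startswith s "%" then 0 else 1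

def pvBefore (a b : String) : Bool := decide (pvKey a < pvKey b)

theorem pvKey_le (s : String) : pvKey s ≤ 1 := by
  unfold pvKey; split <;> omega

-- A's loop computes the two filters
theorem pvA_foldl (xs : List String) (i pr : List String) :
    xs.foldl (fun (st : List String × List String) instr =>
      if PySem.Str.startswith instr "%" then (st.1, st.2 ++ [instr])
      else (st.1 ++ [instr], st.2)) (i, pr)
    = (i ++ xs.filter (fun s => !PySem.Str.startswith s "%"),
       pr ++ xs.filter (fun s => PySem.Str.startswith s "%")) := by
  induction xs generalizing i pr with
  | nil => simp
  | cons x xs ih =>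
    by_cases h : PySem.Str.startswith x "%" = true
    · simp only [List.foldl_cons, h, if_true, List.filter_cons, Bool.not_true]
      rw [ih]; simp
    · have h' : PySem.Str.startswith x "%" = false := by simpa using h
      simp only [List.foldl_cons, h', if_false, List.filter_cons, Bool.not_false]
      rw [ih]; simp

-- inserting a directive (key 0) lands right after the directive block
theorem pvInsert_dir (x : String) (P I : List String)
    (hx : pvKey x = 0)
    (hP : ∀ y ∈ P, pvKey y = 0) (hI : ∀ y ∈ I, pvKey y = 1) :
    PySem.List.insertBy pvBefore x (P ++ I) = (P ++ [x]) ++ I := by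
  induction P with
  | nil =>
    cases I with
    | nil => simp [PySem.List.insertBy]
    | cons y ys =>
      have hy : pvKey y = 1 := hI y (by simp)
      simp [PySem.List.insertBy, pvBefore, hx, hy]
  | cons q P' ih =>
    have hq : pvKey q = 0 := hP q (by simp)
    have := ih (fun y hy => hP y (by simp [hy]))
    simp [PySem.List.insertBy, pvBefore, hx, hq, this]

-- inserting a non-directive (key 1) lands at the end
theorem pvInsert_instr (x : String) (L : List String) (hx : pvKey x = 1) :
    PySem.List.insertBy pvBefore x L = L ++ [x] := by
  apply PySem.List.insertBy_of_forall_not_before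
  intro y _
  have := pvKey_le y
  simp [pvBefore, hx]; omega

-- B's insertion-sort fold keeps "directive block ++ instruction block"
theorem pvB_foldl (xs : List String) (P I : List String)
    (hP : ∀ y ∈ P, pvKey y = 0) (hI : ∀ y ∈ I, pvKey y = 1) :
    xs.foldl (fun acc x => PySem.List.insertBy pvBefore x acc) (P ++ I)
    = (P ++ xs.filter (fun s => PySem.Str.startswith s "%"))
      ++ (I ++ xs.filter (fun s => !PySem.Str.startswith s "%")) := by
  induction xs generalizing P I with
  | nil => simp
  | cons x xs ih =>
    by_cases h : PySem.Str.startswith x "%" = true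
    · have hx : pvKey x = 0 := by simp only [pvKey, h, if_true]
      have hstep := pvInsert_dir x P I hx hP hI
      have hIH := ih (P ++ [x]) I
        (fun y hy => by
          rcases List.mem_append.1 hy with hy | hy
          · exact hP y hy
          · simp at hy; subst hy; exact hx) hI
      simp only [List.foldl_cons, hstep]
      rw [hIH]
      simp only [List.filter_cons, h, if_true, Bool.not_true, Bool.false_eq_true, if_false]
      simp [List.append_assoc]
    · have h' : PySem.Str.startswith x "%" = false := by simpa using h
      have hx : pvKey x = 1 := by simp only [pvKey, h', Bool.false_eq_true, if_false]
      have hstep := pvInsert_instr x (P ++ I) hx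
      have hIH := ih P (I ++ [x]) hP
        (fun y hy => by
          rcases List.mem_append.1 hy with hy | hy
          · exact hI y hy
          · simp at hy; subst hy; exact hx)
      simp only [List.foldl_cons, hstep, List.append_assoc]
      rw [hIH]
      simp only [List.filter_cons, h', Bool.not_false, if_true, Bool.false_eq_true, if_false]
      simp [List.append_assoc]

theorem pvAlt_eq (source : List String) :
    pre_to_header_alt source
    = source.filter (fun s => PySem.Str.startswith s "%")
      ++ source.filter (fun s => !PySem.Str.startswith s "%") := by
  unfold pre_to_header_alt
  rw [PySem.List.sorted_eq_foldl_insertBy]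
  have hb : (fun (a b : String) =>
      decide ((if PySem.Str.startswith a "%" then (0:Nat) else 1)
        < (if PySem.Str.startswith b "%" then (0:Nat) else 1))) = pvBefore := by
    funext a b; simp [pvBefore, pvKey]
  rw [hb]
  have := pvB_foldl source [] [] (by simp) (by simp)
  simpa using this

-- ===== VERDICT (by name: the statement is the Claim_ definition above) =====
theorem pre_to_header_spec : Claim_equal_pre_to_header := by
  intro source _
  show pre_to_header source = pre_to_header_alt source
  unfold pre_to_header
  rw [pvA_foldl, pvAlt_eq]
  simp
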